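-- pv_equiv track=rewrite | github.com/SamsungLabs/Multitask-RFG | mtrfg/utils/data_utils.py | build_augmented_recipe
-- ===== SOURCE A (Python) =====
-- def build_augmented_recipe(recipe):
-- 	"""
-- 		Here we augment recipe with the step IDs. We assume that each
-- 		step ends with ".", "?" or "!".
-- 		Example:
-- 			Input: "Pour soda. Stir the mixture" will basically become
-- 			["01_Pour", "01_soda", "01_.", "02_Stir", "02_the", "02_mixture"]
--
-- 		Input: Note that the input here is CoNLLU format recipe as a list, where
-- 		each element would correspond to a single token!
-- 	"""
-- 	end_puncs = ".?!" ## this could be made better.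
-- 	step_id = 1
-- 	augmented_tokens, recipes_as_list_of_steps = [], ['']
-- 	for recipe_token in recipe:
-- 		token = recipe_token.split('\t')[1]
-- 		augmented_tokens.append(f'{step_id}'.zfill(2) + f'_{token}')
-- 		recipes_as_list_of_steps[-1] += f'{token} '
-- 		if token in end_puncs:
-- 			step_id = step_id +  1
-- 			recipes_as_list_of_steps[-1] = recipes_as_list_of_steps[-1].replace(f'{token} ', token)
-- 			recipes_as_list_of_steps.append('')
--
-- 	return augmented_tokens, recipes_as_list_of_steps
-- ===== SOURCE B (Python) =====
-- def build_augmented_recipe(recipe):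
--     """Grouped re-implementation: extract tokens, group into segments ending after
--     an end-punctuation token, then build both outputs from the segments."""
--     end_puncs = ".?!"
--
--     tokens = [rt.split('\t')[1] for rt in recipe]
--
--     segments = []
--     cur = []
--     for tok in tokens:
--         cur.append(tok)
--         if tok in end_puncs:
--             segments.append(cur)
--             cur = []
--     segments.append(cur)
--
--     augmented_tokens = [
--         str(i + 1).zfill(2) + f'_{tok}'
--         for i, seg in enumerate(segments)
--         for tok in seg
--     ]
--
--     def seg_str(seg):
--         if not seg:
--             return ''
--         s = ' '.join(seg) + ' '
--         last = seg[-1]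
--         if last in end_puncs:
--             s = s.replace(last + ' ', last)
--         return s
--
--     recipes_as_list_of_steps = [seg_str(seg) for seg in segments]
--     return augmented_tokens, recipes_as_list_of_steps
-- ===== Notes on version B (the rewrite author's own statement) =====
-- stated objective: alternative
-- what changed: B replaces A's single stateful loop (step counter plus in-place mutation of the last step string) by a grouped decomposition: extract all tokens, group them into step segments, then build the augmented tokens from enumerated segments and each step string by join-then-replace per segment.
import Mathlib
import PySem

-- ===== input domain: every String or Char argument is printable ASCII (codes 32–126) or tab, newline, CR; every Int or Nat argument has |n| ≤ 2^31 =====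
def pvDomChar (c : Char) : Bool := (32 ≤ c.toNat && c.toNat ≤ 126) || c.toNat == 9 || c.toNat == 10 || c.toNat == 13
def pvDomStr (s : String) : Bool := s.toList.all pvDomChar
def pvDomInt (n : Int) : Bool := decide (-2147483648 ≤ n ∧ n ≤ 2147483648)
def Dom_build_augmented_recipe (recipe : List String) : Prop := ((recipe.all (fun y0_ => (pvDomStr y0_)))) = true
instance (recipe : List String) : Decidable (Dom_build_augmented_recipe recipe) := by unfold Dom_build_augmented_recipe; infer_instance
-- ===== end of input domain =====

-- B regroups the work: it extracts all tokens, groups them into step segments, and builds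
-- both outputs from the segments (objective: alternative decomposition, same exact values).

-- shared helpers: `recipe_token.split('\t')[1]`, `f'{step_id}'.zfill(2) + f'_{token}'`,
-- and `token in end_puncs` (Python substring test), each used verbatim by both sources
def pvToken (rt : String) : String := ((PySem.Str.split? rt "\t").getD []).getD 1 ""
def pvTag (sid : Int) (tok : String) : String := PySem.Str.zfill (PySem.Int.toStr sid) 2 ++ ("_" ++ tok)
def pvPunc (t : String) : Bool := PySem.Str.isIn t ".?!"

-- ===== PORT A =====
-- A's loop body, given the already-extracted token (steps list kept whole, last entry mutated)
def pvStepA (st : Int × List String × List String) (token : String) : Int × List String × List String :=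
  let step_id := st.1
  let aug := st.2.1 ++ [pvTag step_id token]
  let steps := st.2.2.dropLast ++ [st.2.2.getLastD "" ++ (token ++ " ")]
  if pvPunc token then
    (step_id + 1, aug,
      (steps.dropLast ++ [PySem.Str.replace (steps.getLastD "") (token ++ " ") token]) ++ [""])
  else
    (step_id, aug, steps)

def build_augmented_recipe (recipe : List String) : List String × List String :=
  let st := recipe.foldl (fun st rt => pvStepA st (pvToken rt))
      ((1 : Int), ([] : List String), ([""] : List String))
  (st.2.1, st.2.2)

-- ===== PORT B =====
-- B's grouping loop body: append the token to the current segment, flush it after an end punc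
def pvStepB (st : List (List String) × List String) (tok : String) : List (List String) × List String :=
  let cur := st.2 ++ [tok]
  if pvPunc tok then (st.1 ++ [cur], []) else (st.1, cur)

-- Source B's seg_str: '' for an empty segment, else join + trailing space, replace-all after end punc
def pvSegStr (seg : List String) : String :=
  match seg with
  | [] => ""
  | _ :: _ =>
    let s := PySem.Str.join " " seg ++ " "
    let last := seg.getLastD ""
    if pvPunc last then PySem.Str.replace s (last ++ " ") last else s

def build_augmented_recipe_alt (recipe : List String) : List String × List String :=
  let tokens := recipe.map pvToken
  let grp := tokens.foldl pvStepB ([], [])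
  let segments := grp.1 ++ [grp.2]
  let augmented := (PySem.List.enumerate segments).flatMap
      (fun p => p.2.map (fun tok => pvTag (p.1 + 1) tok))
  (augmented, segments.map pvSegStr)

-- ===== PRECONDITION & SPEC =====
-- Pre_ excludes exactly the inputs where A raises: a token line with no '\t' makes
-- `recipe_token.split('\t')[1]` raise IndexError (B raises identically there).
def Pre_build_augmented_recipe (recipe : List String) : Prop :=
  ∀ t ∈ recipe, PySem.Str.isIn "\t" t = true
instance (recipe : List String) : Decidable (Pre_build_augmented_recipe recipe) := by unfold Pre_build_augmented_recipe; infer_instance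

def pvWitness_build_augmented_recipe : List String := ["a\tPour", "b\tsoda", "c\t.", "d\tStir"]

def Spec_build_augmented_recipe (recipe : List String) (out : List String × List String) : Prop := out = build_augmented_recipe_alt recipe
instance (recipe : List String) (out : List String × List String) : Decidable (Spec_build_augmented_recipe recipe out) := by unfold Spec_build_augmented_recipe; infer_instance

-- ===== CLAIM (what is proved, stated in full; the proofs are below) =====
def Claim_equal_build_augmented_recipe : Prop := ∀ (recipe : List String), Dom_build_augmented_recipe recipe → Pre_build_augmented_recipe recipe → Spec_build_augmented_recipe recipe (build_augmented_recipe recipe)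

-- ===== LEMMAS AND PROOFS =====

-- reference shapes both loops are reduced to: the step-id stream, the tagged tokens, the step strings
def pvSpecSid (sid : Int) : List String → Int
  | [] => sid
  | t :: r => pvSpecSid (if pvPunc t then sid + 1 else sid) r

def pvSpecAug (sid : Int) : List String → List String
  | [] => []
  | t :: r => pvTag sid t :: pvSpecAug (if pvPunc t then sid + 1 else sid) r

def pvSpecSteps (cur : String) : List String → List String
  | [] => [cur]
  | t :: r =>
    if pvPunc t then
      PySem.Str.replace (cur ++ (t ++ " ")) (t ++ " ") t :: pvSpecSteps "" r
    else
      pvSpecSteps (cur ++ (t ++ " ")) r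

-- the accumulated current-step string of A: each token followed by one space
def pvRaw (l : List String) : String := l.foldl (fun acc t => acc ++ (t ++ " ")) ""

theorem pvRaw_init (l : List String) : ∀ (a : String),
    l.foldl (fun acc t => acc ++ (t ++ " ")) a = a ++ pvRaw l := by
  induction l with
  | nil => intro a; simp [pvRaw]
  | cons t r ih =>
    intro a
    have h1 : pvRaw (t :: r) = (t ++ " ") ++ pvRaw r := by
      show List.foldl _ ("" ++ (t ++ " ")) r = _
      rw [ih, String.empty_append]
    rw [List.foldl_cons, ih, h1, String.append_assoc]

theorem pvRaw_concat (l : List String) (t : String) :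
    pvRaw (l ++ [t]) = pvRaw l ++ (t ++ " ") := by
  show List.foldl _ "" (l ++ [t]) = _
  rw [List.foldl_append, List.foldl_cons, List.foldl_nil, pvRaw_init, String.empty_append]

theorem pvRaw_cons (t : String) (l : List String) :
    pvRaw (t :: l) = (t ++ " ") ++ pvRaw l := by
  show List.foldl _ ("" ++ (t ++ " ")) l = _
  rw [pvRaw_init, String.empty_append]

theorem pvJoin_singleton (a : String) : PySem.Str.join " " [a] = a := by
  apply String.ext
  simp [PySem.Str.toList_join, PySem.Chars.join, List.intercalate]

theorem pvJoin_cons₂ (a b : String) (l : List String) :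
    PySem.Str.join " " (a :: b :: l) = a ++ (" " ++ PySem.Str.join " " (b :: l)) := by
  apply String.ext
  simp [PySem.Str.toList_join, PySem.Chars.join, List.intercalate]

theorem pvJoin_raw (l : List String) (h : l ≠ []) :
    PySem.Str.join " " l ++ " " = pvRaw l := by
  induction l with
  | nil => exact absurd rfl h
  | cons a r ih =>
    cases r with
    | nil =>
      rw [pvJoin_singleton, pvRaw_cons]
      simp [pvRaw]
    | cons b r' =>
      rw [pvJoin_cons₂, String.append_assoc, String.append_assoc, ih (by simp)]
      simp [pvRaw_cons, String.append_assoc]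

theorem pvSegStr_cons (a : String) (r : List String) :
    pvSegStr (a :: r) =
      if pvPunc ((a :: r).getLastD "") then
        PySem.Str.replace (PySem.Str.join " " (a :: r) ++ " ") (((a :: r).getLastD "") ++ " ")
          ((a :: r).getLastD "")
      else PySem.Str.join " " (a :: r) ++ " " := rfl

theorem pvSegStr_raw (l : List String)
    (h : l = [] ∨ pvPunc (l.getLastD "") = false) : pvSegStr l = pvRaw l := by
  cases l with
  | nil => rfl
  | cons a r =>
    have hp : pvPunc ((a :: r).getLastD "") = false := by
      rcases h with h | h
      · exact absurd h (by simp)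
      · exact h
    rw [pvSegStr_cons, hp]
    simp only [Bool.false_eq_true, if_false]
    exact pvJoin_raw (a :: r) (by simp)

theorem pvSegStr_punc (l : List String) (t : String) (h : pvPunc t = true) :
    pvSegStr (l ++ [t]) = PySem.Str.replace (pvRaw (l ++ [t])) (t ++ " ") t := by
  have hlast : (l ++ [t]).getLastD "" = t := List.getLastD_concat
  cases l with
  | nil =>
    rw [List.nil_append] at hlast ⊢
    rw [pvSegStr_cons, hlast, h, if_pos rfl, pvJoin_raw [t] (by simp)]
  | cons x l' =>
    rw [List.cons_append] at hlast ⊢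
    rw [pvSegStr_cons, hlast, h, if_pos rfl, pvJoin_raw (x :: (l' ++ [t])) (by simp)]

theorem pvFoldB_shift (toks : List String) : ∀ (segs : List (List String)) (cur : List String),
    toks.foldl pvStepB (segs, cur) =
      (segs ++ (toks.foldl pvStepB ([], cur)).1, (toks.foldl pvStepB ([], cur)).2) := by
  induction toks with
  | nil => intro segs cur; simp
  | cons t r ih =>
    intro segs cur
    cases hp : pvPunc t with
    | true =>
      simp only [List.foldl_cons, pvStepB, hp, if_true, List.nil_append]
      rw [ih (segs ++ [cur ++ [t]]) [], ih [cur ++ [t]] []]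
      simp
    | false =>
      simp only [List.foldl_cons, pvStepB, hp, Bool.false_eq_true, if_false, List.nil_append]
      exact ih segs (cur ++ [t])

theorem pvB_steps (toks : List String) : ∀ (cur0 : List String),
    (cur0 = [] ∨ pvPunc (cur0.getLastD "") = false) →
    ((toks.foldl pvStepB ([], cur0)).1 ++ [(toks.foldl pvStepB ([], cur0)).2]).map pvSegStr
      = pvSpecSteps (pvRaw cur0) toks := by
  induction toks with
  | nil =>
    intro cur0 h
    simp [pvSpecSteps, pvSegStr_raw cur0 h]
  | cons t r ih =>
    intro cur0 h
    cases hp : pvPunc t with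
    | true =>
      simp only [List.foldl_cons, pvStepB, hp, if_true, List.nil_append]
      rw [pvFoldB_shift r [cur0 ++ [t]] []]
      simp only [List.cons_append, List.nil_append, List.map_cons]
      rw [ih [] (Or.inl rfl)]
      simp only [pvSpecSteps, hp, if_true]
      rw [pvSegStr_punc cur0 t hp, pvRaw_concat]
      rfl
    | false =>
      simp only [List.foldl_cons, pvStepB, hp, Bool.false_eq_true, if_false, List.nil_append]
      rw [ih (cur0 ++ [t]) (Or.inr (by rw [List.getLastD_concat]; exact hp))]
      simp [pvSpecSteps, hp, pvRaw_concat]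

theorem pvB_aug (toks : List String) : ∀ (cur0 : List String) (base : Int),
    ((PySem.List.enumerate ((toks.foldl pvStepB ([], cur0)).1 ++ [(toks.foldl pvStepB ([], cur0)).2]) base).flatMap
        (fun p => p.2.map (fun tok => pvTag (p.1 + 1) tok)))
      = cur0.map (pvTag (base + 1)) ++ pvSpecAug (base + 1) toks := by
  induction toks with
  | nil =>
    intro cur0 base
    simp [PySem.List.enumerate_cons, PySem.List.enumerate_nil, pvSpecAug]
  | cons t r ih =>
    intro cur0 base
    cases hp : pvPunc t with
    | true =>
      simp only [List.foldl_cons, pvStepB, hp, if_true, List.nil_append]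
      rw [pvFoldB_shift r [cur0 ++ [t]] []]
      simp only [List.cons_append, List.nil_append,
        PySem.List.enumerate_cons, List.flatMap_cons]
      rw [ih [] (base + 1)]
      simp [pvSpecAug, hp, List.map_append]
    | false =>
      simp only [List.foldl_cons, pvStepB, hp, Bool.false_eq_true, if_false, List.nil_append]
      rw [ih (cur0 ++ [t]) base]
      simp [pvSpecAug, hp, List.map_append]

theorem pvA_loop (toks : List String) : ∀ (sid : Int) (aug done : List String) (cur : String),
    toks.foldl pvStepA (sid, aug, done ++ [cur]) =
      (pvSpecSid sid toks, aug ++ pvSpecAug sid toks, done ++ pvSpecSteps cur toks) := by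
  induction toks with
  | nil => intro sid aug done cur; simp [pvSpecSid, pvSpecAug, pvSpecSteps]
  | cons t r ih =>
    intro sid aug done cur
    cases hp : pvPunc t with
    | true =>
      simp only [List.foldl_cons, pvStepA, List.dropLast_concat, List.getLastD_concat, hp, if_true]
      rw [ih (sid + 1) (aug ++ [pvTag sid t])
        (done ++ [PySem.Str.replace (cur ++ (t ++ " ")) (t ++ " ") t]) ""]
      simp [pvSpecSid, pvSpecAug, pvSpecSteps, hp]
    | false =>
      simp only [List.foldl_cons, pvStepA, List.dropLast_concat, List.getLastD_concat, hp,
        Bool.false_eq_true, if_false]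
      rw [ih sid (aug ++ [pvTag sid t]) done (cur ++ (t ++ " "))]
      simp [pvSpecSid, pvSpecAug, pvSpecSteps, hp]

-- ===== VERDICT (by name: the statement is the Claim_ definition above) =====
theorem build_augmented_recipe_spec : Claim_equal_build_augmented_recipe := by
  intro recipe _ _
  show build_augmented_recipe recipe = build_augmented_recipe_alt recipe
  simp only [build_augmented_recipe, build_augmented_recipe_alt]
  rw [← List.foldl_map (f := pvToken) (g := pvStepA) (l := recipe)]
  rw [show ([""] : List String) = [] ++ [""] from List.nil_append [""] |>.symm]
  rw [pvA_loop (recipe.map pvToken) 1 [] [] ""]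
  rw [pvB_aug (recipe.map pvToken) [] 0, pvB_steps (recipe.map pvToken) [] (Or.inl rfl)]
  norm_num
  rfl
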